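-- pv_equiv track=rewrite | github.com/DataStas/Working_repo | algorithms/leetcode/new/2389. Longest Subsequence With Limited Sum.py | answerQueries
-- ===== SOURCE A (Python) =====
-- def answerQueries(nums, queries):
--     """
--     :type nums: List[int]
--     :type queries: List[int]
--     :rtype: List[int]
--     """
--     nums.sort()
--     for i in range(1, len(nums)):
--         nums[i] += nums[i-1]
--     ans = []
--     for q in queries:
--         l = 0
--         r = len(nums) - 1
--         while l <= r:
--             m = (l+r) // 2
--             if nums[m] > q:
--                 r = m - 1
--             else:
--                 l = m + 1
--         ans.append(l)
--     return ans
-- ===== SOURCE B (Python) =====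
-- def answerQueries(nums, queries):
--     nums.sort()
--     prefix = []
--     running = 0
--     for x in nums:
--         running += x
--         prefix.append(running)
--
--     def locate(lo, hi, q):
--         # half-open interval [lo, hi); probe index (lo+hi-1)//2
--         if lo >= hi:
--             return lo
--         mid = (lo + hi - 1) // 2
--         if prefix[mid] > q:
--             return locate(lo, mid, q)
--         return locate(mid + 1, hi, q)
--
--     return [locate(0, len(prefix), q) for q in queries]
-- ===== Notes on version B (the rewrite author's own statement) =====
-- stated objective: alternative
-- what changed: B replaces A's in-place prefix overwrite of nums with a running-sum accumulation into a fresh list, and A's iterative closed-interval binary-search while-loop with a recursive half-open-interval search probing (lo+hi-1)//2, collecting answers with a comprehension instead of an append loop.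
import Mathlib
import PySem

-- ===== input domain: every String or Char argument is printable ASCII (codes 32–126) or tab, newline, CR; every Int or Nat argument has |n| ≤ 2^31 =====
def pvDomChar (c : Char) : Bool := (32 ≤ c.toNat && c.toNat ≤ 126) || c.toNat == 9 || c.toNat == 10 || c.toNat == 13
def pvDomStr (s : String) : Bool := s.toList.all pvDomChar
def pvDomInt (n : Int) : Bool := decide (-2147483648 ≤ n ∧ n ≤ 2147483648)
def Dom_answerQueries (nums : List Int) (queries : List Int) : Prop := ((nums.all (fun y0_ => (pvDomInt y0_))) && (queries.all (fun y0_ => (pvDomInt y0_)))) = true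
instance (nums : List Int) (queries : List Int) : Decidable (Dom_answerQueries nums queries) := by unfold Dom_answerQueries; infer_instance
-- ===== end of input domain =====

-- B replaces A's in-place prefix overwrite and iterative closed-interval while-loop by a
-- running-sum accumulation and a recursive half-open binary search (objective: alternative
-- decomposition, same cost). Return-value equivalence only: A overwrites nums with prefix
-- sums in place, B only sorts nums in place.

-- ===== PORT A =====
-- A's while loop 'while l <= r: m = (l+r)//2; …' (closed interval, returns l)
def pvBisectA (xs : List Int) (q : Int) (l r : Int) : Int :=
  if h : l ≤ r then
    let m := PySem.Int.floordiv (l + r) 2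
    -- nums[m]: m is always in range here; pyGetD is exact for in-range indices
    if PySem.List.pyGetD xs m 0 > q then pvBisectA xs q l (m - 1)
    else pvBisectA xs q (m + 1) r
  else l
termination_by (r + 1 - l).toNat
decreasing_by
  all_goals
    have hb := PySem.Int.floordiv_two_mid_bounds (lo := l) (hi := r) h
    omega

def answerQueries (nums : List Int) (queries : List Int) : List Int :=
  let s := PySem.List.sorted nums (fun x => x)
  -- for i in range(1, len(nums)): nums[i] += nums[i-1]   (indices always in range)
  let s2 := (PySem.List.pyRange 1 (PySem.List.len s)).foldl
      (fun xs i => PySem.List.pySetD xs i (PySem.List.pyGetD xs i 0 + PySem.List.pyGetD xs (i - 1) 0)) s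
  queries.foldl (fun ans q => ans ++ [pvBisectA s2 q 0 (PySem.List.len s2 - 1)]) []

-- ===== PORT B =====
-- B's recursive binary search on the half-open interval [lo, hi), probing (lo+hi-1)//2
def pvLocateB (xs : List Int) (q : Int) (lo hi : Int) : Int :=
  if h : lo ≥ hi then lo
  else
    let mid := PySem.Int.floordiv (lo + hi - 1) 2
    if PySem.List.pyGetD xs mid 0 > q then pvLocateB xs q lo mid
    else pvLocateB xs q (mid + 1) hi
termination_by (hi - lo).toNat
decreasing_by
  all_goals
    have hb := PySem.Int.floordiv_two_mid_bounds (lo := lo) (hi := hi - 1) (by omega)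
    rw [show lo + (hi - 1) = lo + hi - 1 from by ring] at hb
    omega

def answerQueries_alt (nums : List Int) (queries : List Int) : List Int :=
  let s := PySem.List.sorted nums (fun x => x)
  -- running-sum accumulation: prefix = []; running = 0; for x in nums: running += x; prefix.append(running)
  let pr := (s.foldl (fun (p : Int × List Int) x => (p.1 + x, p.2 ++ [p.1 + x])) ((0 : Int), ([] : List Int))).2
  queries.map (fun q => pvLocateB pr q 0 (PySem.List.len pr))

-- ===== PRECONDITION & SPEC =====
def Spec_answerQueries (nums : List Int) (queries : List Int) (out : List Int) : Prop := out = answerQueries_alt nums queries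
instance (nums : List Int) (queries : List Int) (out : List Int) : Decidable (Spec_answerQueries nums queries out) := by unfold Spec_answerQueries; infer_instance

-- ===== CLAIM (what is proved, stated in full; the proofs are below) =====
def Claim_equal_answerQueries : Prop := ∀ (nums : List Int) (queries : List Int), Dom_answerQueries nums queries → Spec_answerQueries nums queries (answerQueries nums queries)

-- ===== LEMMAS AND PROOFS =====

-- mathematical prefix-sum list both prefix computations are proved equal to
def pvScan (t : Int) : List Int → List Int
  | [] => []
  | x :: xs => (t + x) :: pvScan (t + x) xs

theorem pvScan_length (t : Int) (l : List Int) : (pvScan t l).length = l.length := by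
  induction l generalizing t with
  | nil => rfl
  | cons x xs ih => simp [pvScan, ih]

theorem pvScan_append (t : Int) (l : List Int) (y : Int) :
    pvScan t (l ++ [y]) = pvScan t l ++ [t + l.sum + y] := by
  induction l generalizing t with
  | nil => simp [pvScan]
  | cons x xs ih => simp [pvScan, ih]; ring_nf

theorem pvScan_getD_last (t : Int) (l : List Int) (h : l ≠ []) :
    (pvScan t l).getD (l.length - 1) 0 = t + l.sum := by
  induction l generalizing t with
  | nil => exact absurd rfl h
  | cons x xs ih =>
    cases xs with
    | nil => simp [pvScan]
    | cons y ys =>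
      have := ih (t := t + x) (by simp)
      simpa [pvScan, add_assoc] using this

-- B's running-sum foldl builds acc ++ pvScan t s
theorem pvFoldB (s : List Int) (t : Int) (acc : List Int) :
    (s.foldl (fun (p : Int × List Int) x => (p.1 + x, p.2 ++ [p.1 + x])) (t, acc)).2
      = acc ++ pvScan t s := by
  induction s generalizing t acc with
  | nil => simp [pvScan]
  | cons x xs ih => simp [pvScan, ih]

-- invariant of A's in-place loop: after i = 1 .. k-1, the first k cells hold prefix sums
theorem pvFoldA_inv (s : List Int) (k : Nat) (hk : k ≤ s.length) :
    (PySem.List.pyRange 1 (k : Int)).foldl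
      (fun xs i => PySem.List.pySetD xs i (PySem.List.pyGetD xs i 0 + PySem.List.pyGetD xs (i - 1) 0)) s
      = pvScan 0 (s.take k) ++ s.drop k := by
  induction k with
  | zero =>
    rw [show ((0 : Nat) : Int) = 0 from rfl, PySem.List.pyRange_one_eq_nil (by omega)]
    simp [pvScan]
  | succ k ih =>
    have hk' : k ≤ s.length := by omega
    have hcast : ((k + 1 : Nat) : Int) = (k : Int) + 1 := by push_cast; ring
    rw [hcast]
    by_cases hk0 : k = 0
    · subst hk0
      rw [show ((0 : Nat) : Int) + 1 = 1 from by norm_num, PySem.List.pyRange_one_eq_nil (by omega)]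
      cases s with
      | nil => simp at hk
      | cons x xs => simp [pvScan]
    · have h1k : (1 : Int) ≤ (k : Int) := by omega
      rw [PySem.List.pyRange_one_succ_right h1k, List.foldl_append, ih hk']
      -- one more step of the loop, at index k
      have hkl : k < s.length := by omega
      have hlenP : (pvScan 0 (s.take k)).length = k := by
        rw [pvScan_length]; simp [Nat.min_eq_left hk']
      have hdrop : s.drop k = s[k] :: s.drop (k + 1) := List.drop_eq_getElem_cons hkl
      have hget_k : PySem.List.pyGetD (pvScan 0 (s.take k) ++ s.drop k) ((k : Int)) 0 = s[k] := by
        rw [PySem.List.pyGetD_natCast, hdrop]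
        rw [List.getD_eq_getElem?_getD, List.getElem?_append_right (by omega)]
        simp [hlenP, List.getElem?_eq_getElem hkl]
      have hget_k1 : PySem.List.pyGetD (pvScan 0 (s.take k) ++ s.drop k) ((k : Int) - 1) 0
          = 0 + (s.take k).sum := by
        have hc2 : ((k : Int) - 1) = ((k - 1 : Nat) : Int) := by omega
        rw [hc2, PySem.List.pyGetD_natCast]
        rw [List.getD_eq_getElem?_getD, List.getElem?_append_left (by omega)]
        have hne : s.take k ≠ [] := by
          cases hs : s.take k with
          | nil =>
            exfalso
            have := congrArg List.length hs
            simp [Nat.min_eq_left hk'] at this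
            omega
          | cons a l => simp
        have hlast := pvScan_getD_last 0 (s.take k) hne
        rw [List.getD_eq_getElem?_getD] at hlast
        simp only [Nat.min_eq_left hk', List.length_take] at hlast
        exact hlast
      rw [List.foldl_cons, List.foldl_nil, hget_k, hget_k1, PySem.List.pySetD_natCast]
      rw [List.set_append, if_neg (by omega), hlenP, Nat.sub_self, hdrop]
      have htake : s.take (k + 1) = s.take k ++ [s[k]] := by
        rw [List.take_add_one, List.getElem?_eq_getElem hkl]
        rfl
      rw [htake, pvScan_append]
      simp [List.set]
      ring_nf

-- A's binary search on [l, hi-1] equals B's on [l, hi)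
theorem pvBisect_eq (xs : List Int) (q : Int) :
    ∀ (n : Nat) (lo hi : Int), (hi - lo).toNat ≤ n → pvBisectA xs q lo (hi - 1) = pvLocateB xs q lo hi := by
  intro n
  induction n with
  | zero =>
    intro lo hi h
    rw [pvBisectA, pvLocateB]
    rw [dif_neg (by omega), dif_pos (by omega)]
  | succ n ih =>
    intro lo hi h
    rw [pvBisectA, pvLocateB]
    by_cases hle : lo ≤ hi - 1
    · rw [dif_pos hle, dif_neg (by omega)]
      have hmid := PySem.Int.floordiv_two_mid_bounds (lo := lo) (hi := hi - 1) hle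
      rw [show lo + (hi - 1) = lo + hi - 1 from by ring] at hmid ⊢
      set m := PySem.Int.floordiv (lo + hi - 1) 2 with hmdef
      by_cases hc : PySem.List.pyGetD xs m 0 > q
      · rw [if_pos hc, if_pos hc]
        exact ih lo m (by omega)
      · rw [if_neg hc, if_neg hc]
        exact ih (m + 1) hi (by omega)
    · rw [dif_neg hle, dif_pos (by omega)]

-- ===== VERDICT (by name: the statement is the Claim_ definition above) =====
theorem answerQueries_spec : Claim_equal_answerQueries := by
  intro nums queries _
  unfold Spec_answerQueries answerQueries answerQueries_alt
  simp only [pvFoldB, List.nil_append, PySem.List.len_eq]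
  rw [pvFoldA_inv (PySem.List.sorted nums (fun x => x)) (PySem.List.sorted nums (fun x => x)).length le_rfl]
  simp only [List.take_length, List.drop_length, List.append_nil]
  rw [PySem.List.foldl_append_singleton_eq_map, List.nil_append]
  refine List.map_congr_left ?_
  intro q _
  have h := pvBisect_eq (pvScan 0 (PySem.List.sorted nums (fun x => x))) q
      ((pvScan 0 (PySem.List.sorted nums (fun x => x))).length) 0
      ((pvScan 0 (PySem.List.sorted nums (fun x => x))).length : Int) (by omega)
  simpa using h
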